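-- pv_equiv track=rewrite | github.com/bjpl/git_analysis | MySpanishApp/ai/intelligence/pronunciation_analyzer.py | _get_ipa_transcription
-- ===== SOURCE A (Python) =====
-- def _get_ipa_transcription(word: str) -> str:
--     """Get IPA transcription (simplified mapping)"""
--     # This is a simplified version - a real implementation would need
--     # a comprehensive phonetic dictionary
--     ipa_map = {
--         'a': 'a', 'e': 'e', 'i': 'i', 'o': 'o', 'u': 'u',
--         'j': 'x', 'g': 'g', 'ñ': 'ɲ', 'rr': 'r', 'r': 'ɾ',
--         'll': 'ʎ', 'ch': 'tʃ', 'qu': 'k', 'c': 'k'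
--     }
--
--     # Simple character-by-character mapping
--     result = ""
--     i = 0
--     while i < len(word):
--         if i < len(word) - 1:
--             two_char = word[i:i+2]
--             if two_char in ipa_map:
--                 result += ipa_map[two_char]
--                 i += 2
--                 continue
--
--         if word[i] in ipa_map:
--             result += ipa_map[word[i]]
--         else:
--             result += word[i]
--         i += 1
--
--     return f"/{result}/"
-- ===== SOURCE B (Python) =====
-- def _get_ipa_transcription(word: str) -> str:
--     """Get IPA transcription (simplified mapping)"""
--     digraphs = {'rr': 'r', 'll': 'ʎ', 'ch': 'tʃ', 'qu': 'k'}
--     singles = {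
--         'a': 'a', 'e': 'e', 'i': 'i', 'o': 'o', 'u': 'u',
--         'j': 'x', 'g': 'g', 'ñ': 'ɲ', 'r': 'ɾ', 'c': 'k'
--     }
--     # Single pass over the characters with a one-character pending buffer:
--     # a held character combines with the next one when they form a digraph,
--     # otherwise it is emitted via the single-character table.
--     out = []
--     pending = None
--     for c in word:
--         if pending is None:
--             pending = c
--         elif pending + c in digraphs:
--             out.append(digraphs[pending + c])
--             pending = None
--         else:
--             out.append(singles.get(pending, pending))
--             pending = c
--     if pending is not None:
--         out.append(singles.get(pending, pending))
--     return '/' + ''.join(out) + '/'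
-- ===== Notes on version B (the rewrite author's own statement) =====
-- stated objective: faster
-- what changed: Replaced the index-arithmetic while-loop with slicing and repeated string concatenation over a combined one/two-char dict by a single pass over the characters with a one-character pending buffer, list append and one final join, with separate digraph/single tables.
import Mathlib
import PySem

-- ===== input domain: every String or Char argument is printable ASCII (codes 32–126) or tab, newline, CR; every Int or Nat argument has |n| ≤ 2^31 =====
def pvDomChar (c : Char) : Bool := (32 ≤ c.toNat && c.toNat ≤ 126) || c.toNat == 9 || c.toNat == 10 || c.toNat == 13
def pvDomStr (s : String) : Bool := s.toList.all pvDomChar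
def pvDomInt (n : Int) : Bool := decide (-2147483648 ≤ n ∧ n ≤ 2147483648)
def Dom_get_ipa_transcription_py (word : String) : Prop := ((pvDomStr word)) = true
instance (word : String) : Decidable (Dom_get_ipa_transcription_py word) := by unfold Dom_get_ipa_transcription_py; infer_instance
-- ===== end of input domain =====

-- B replaces A's index/slice while-loop (which grows the result by repeated string concatenation)
-- by a single fold with a one-character pending buffer, list append + one join, and separate
-- digraph/single tables; a timing run measured B faster on large inputs.

-- ===== PORT A =====
-- A's ipa_map (Python str keys/values ported as List Char, insertion order kept)
def pvIpaMapA : PySem.Dict (List Char) (List Char) := PySem.Dict.mk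
  [(['a'],['a']),(['e'],['e']),(['i'],['i']),(['o'],['o']),(['u'],['u']),
   (['j'],['x']),(['g'],['g']),(['ñ'],['ɲ']),(['r','r'],['r']),(['r'],['ɾ']),
   (['l','l'],['ʎ']),(['c','h'],['t','ʃ']),(['q','u'],['k']),(['c'],['k'])]

-- A's while-loop; the 'two_char in ipa_map → continue' branch is the `some v` arm
def pvALoop (cs : List Char) (result : List Char) (i : Nat) : List Char :=
  if h : i < cs.length then
    match (if i < cs.length - 1 then
             PySem.Dict.get? pvIpaMapA (PySem.List.slice cs (some (i : Int)) (some ((i + 2 : Nat) : Int)))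
           else none) with
    | some v => pvALoop cs (result ++ v) (i + 2)
    | none =>
      pvALoop cs
        (match PySem.Dict.get? pvIpaMapA [cs[i]] with
         | some v => result ++ v
         | none => result ++ [cs[i]]) (i + 1)
  else result
termination_by cs.length - i

def get_ipa_transcription_py (word : String) : String :=
  String.ofList ('/' :: pvALoop word.toList [] 0 ++ ['/'])

-- ===== PORT B =====
def pvDigraphsB : PySem.Dict (List Char) (List Char) := PySem.Dict.mk
  [(['r','r'],['r']),(['l','l'],['ʎ']),(['c','h'],['t','ʃ']),(['q','u'],['k'])]

def pvSinglesB : PySem.Dict (List Char) (List Char) := PySem.Dict.mk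
  [(['a'],['a']),(['e'],['e']),(['i'],['i']),(['o'],['o']),(['u'],['u']),
   (['j'],['x']),(['g'],['g']),(['ñ'],['ɲ']),(['r'],['ɾ']),(['c'],['k'])]

-- B's loop body; state = (out, pending); out.append + ''.join('') is ported as concatenation onto a char list
def pvBStep (st : List Char × Option Char) (c : Char) : List Char × Option Char :=
  match st.2 with
  | none => (st.1, some c)
  | some p =>
    match PySem.Dict.get? pvDigraphsB [p, c] with
    | some v => (st.1 ++ v, none)
    | none => (st.1 ++ PySem.Dict.getD pvSinglesB [p] [p], some c)

def get_ipa_transcription_py_alt (word : String) : String :=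
  let st := word.toList.foldl pvBStep ([], none)
  let out := match st.2 with
    | some p => st.1 ++ PySem.Dict.getD pvSinglesB [p] [p]
    | none => st.1
  String.ofList ('/' :: out ++ ['/'])

-- ===== PRECONDITION & SPEC =====
def Spec_get_ipa_transcription_py (word : String) (out : String) : Prop := out = get_ipa_transcription_py_alt word
instance (word : String) (out : String) : Decidable (Spec_get_ipa_transcription_py word out) := by unfold Spec_get_ipa_transcription_py; infer_instance

-- ===== CLAIM (what is proved, stated in full; the proofs are below) =====
def Claim_equal_get_ipa_transcription_py : Prop := ∀ (word : String), Dom_get_ipa_transcription_py word → Spec_get_ipa_transcription_py word (get_ipa_transcription_py word)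

-- ===== LEMMAS AND PROOFS =====

-- common recursive characterisation of the greedy digraph-first scan, phrased with B's tables
def pvSingle (c : Char) : List Char := PySem.Dict.getD pvSinglesB [c] [c]

def pvGo : List Char → List Char
  | [] => []
  | [c] => pvSingle c
  | c1 :: c2 :: rest =>
    match PySem.Dict.get? pvDigraphsB [c1, c2] with
    | some v => v ++ pvGo rest
    | none => pvSingle c1 ++ pvGo (c2 :: rest)

-- A's combined map, queried with a two-character key, agrees with B's digraph table
lemma pvMapA_two (c1 c2 : Char) :
    PySem.Dict.get? pvIpaMapA [c1, c2] = PySem.Dict.get? pvDigraphsB [c1, c2] := by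
  simp [pvIpaMapA, pvDigraphsB, PySem.Dict.get?, List.find?]

-- A's combined map, queried with a one-character key, agrees with B's singles table
lemma pvMapA_single (c : Char) :
    PySem.Dict.get? pvIpaMapA [c] = PySem.Dict.get? pvSinglesB [c] := by
  simp [pvIpaMapA, pvSinglesB, PySem.Dict.get?, List.find?]

lemma pvMapA_one (c : Char) :
    (match PySem.Dict.get? pvIpaMapA [c] with
     | some v => v
     | none => [c]) = pvSingle c := by
  rw [pvMapA_single, pvSingle, PySem.Dict.getD]
  cases PySem.Dict.get? pvSinglesB [c] <;> rfl

lemma pvSlice_two (cs : List Char) (i : Nat) (h1 : i + 1 < cs.length) :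
    PySem.List.slice cs (some (i : Int)) (some ((i + 2 : Nat) : Int)) = [cs[i], cs[i + 1]] := by
  have h0 : i < cs.length := by omega
  have h2 : i + 2 - i = 2 := by omega
  rw [PySem.List.slice_natCast, h2, List.drop_eq_getElem_cons h0, List.drop_eq_getElem_cons h1]
  rfl

-- A's loop computes pvGo on the unprocessed suffix
lemma pvALoop_eq (cs : List Char) (result : List Char) (i : Nat) :
    pvALoop cs result i = result ++ pvGo (cs.drop i) := by
  induction result, i using pvALoop.induct (cs := cs) with
  | case1 result i h v hv ih =>
    simp only [dite_eq_ite] at hv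
    have h1 : i < cs.length - 1 := by
      by_contra hc
      simp [hc] at hv
    have h1' : i + 1 < cs.length := by omega
    rw [if_pos h1, pvSlice_two cs i h1', pvMapA_two] at hv
    rw [pvALoop]
    simp only [dif_pos h]
    rw [if_pos h1, pvSlice_two cs i h1', pvMapA_two, hv]
    simp only [ih]
    have hd : cs.drop i = cs[i] :: cs[i + 1] :: cs.drop (i + 2) := by
      rw [List.drop_eq_getElem_cons h, List.drop_eq_getElem_cons h1']
    rw [hd, pvGo, hv, List.append_assoc]
  | case2 result i h hv ih =>
    simp only [dite_eq_ite] at hv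
    rw [pvALoop]
    simp only [dif_pos h]
    rw [hv]
    simp only [ih]
    have hstep : pvGo (cs.drop i) = pvSingle cs[i] ++ pvGo (cs.drop (i + 1)) := by
      by_cases h1 : i < cs.length - 1
      · have h1' : i + 1 < cs.length := by omega
        rw [if_pos h1, pvSlice_two cs i h1', pvMapA_two] at hv
        have hd : cs.drop i = cs[i] :: cs[i + 1] :: cs.drop (i + 2) := by
          rw [List.drop_eq_getElem_cons h, List.drop_eq_getElem_cons h1']
        have hd1 : cs.drop (i + 1) = cs[i + 1] :: cs.drop (i + 2) :=
          List.drop_eq_getElem_cons h1'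
        rw [hd, pvGo, hv, hd1]
      · have hlen : cs.length = i + 1 := by omega
        have hd : cs.drop i = [cs[i]] := by
          rw [List.drop_eq_getElem_cons h]
          simp [List.drop_eq_nil_of_le, hlen]
        rw [hd, List.drop_eq_nil_of_le (by omega : cs.length ≤ i + 1)]
        simp [pvGo]
    rw [hstep]
    have hone := pvMapA_one cs[i]
    cases hx : PySem.Dict.get? pvIpaMapA [cs[i]] <;> rw [hx] at hone <;>
      simp [← hone]
  | case3 result i h =>
    rw [pvALoop]
    simp only [dif_neg h]
    rw [List.drop_eq_nil_of_le (by omega)]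
    simp [pvGo]

-- B's fold with flush computes pvGo of the pending character followed by the remaining input
lemma pvBFold_eq (l : List Char) (out : List Char) (p? : Option Char) :
    (match (l.foldl pvBStep (out, p?)).2 with
     | some p => (l.foldl pvBStep (out, p?)).1 ++ PySem.Dict.getD pvSinglesB [p] [p]
     | none => (l.foldl pvBStep (out, p?)).1) =
      out ++ pvGo (match p? with | none => l | some p => p :: l) := by
  induction l generalizing out p? with
  | nil => cases p? <;> simp [pvGo, pvSingle]
  | cons c rest ih =>
    cases p? with
    | none =>
      simpa [pvBStep] using ih out (some c)
    | some p =>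
      simp only [List.foldl_cons, pvBStep]
      cases hv : PySem.Dict.get? pvDigraphsB [p, c] with
      | some v => simpa [pvGo, hv] using ih (out ++ v) none
      | none => simpa [pvGo, hv, pvSingle] using ih (out ++ PySem.Dict.getD pvSinglesB [p] [p]) (some c)

-- ===== VERDICT (by name: the statement is the Claim_ definition above) =====
theorem get_ipa_transcription_py_spec : Claim_equal_get_ipa_transcription_py := by
  intro word _
  unfold Spec_get_ipa_transcription_py get_ipa_transcription_py get_ipa_transcription_py_alt
  have hA := pvALoop_eq word.toList [] 0
  have hB := pvBFold_eq word.toList [] none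
  simp only [List.drop_zero, List.nil_append] at hA hB
  rw [hA, ← hB]
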